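-- pv_equiv track=rewrite | github.com/Steven-ZhangJM/CS263_Final_Project | solution/p028_3.py | sum_spiral
-- ===== SOURCE A (Python) =====
-- def sum_spiral(n):
--     result = 0
--     val = 1
--
--     for k in range(4 * n - 3):
--         if k % 2 == 0:
--             for i in range(k, k + n):
--                 result += val
--                 val += 1
--         else:
--             for i in range(k, k + n):
--                 result -= val
--                 val += 1
--
--     return result
-- ===== SOURCE B (Python) =====
-- def sum_spiral(n):
--     # Closed form: blocks pair up to -n^2 each; (2n-2) pairs plus one final
--     # positive block give 2*n^2*(n-1) + n*(n+1)//2.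
--     if n < 1:
--         return 0
--     return 2 * n * n * (n - 1) + n * (n + 1) // 2
-- ===== Notes on version B (the rewrite author's own statement) =====
-- stated objective: faster
-- what changed: Replaced the double loop over 4n-3 blocks of n signed increments with an O(1) closed-form expression 2*n^2*(n-1) + n*(n+1)//2 (0 for n < 1).
import Mathlib
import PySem

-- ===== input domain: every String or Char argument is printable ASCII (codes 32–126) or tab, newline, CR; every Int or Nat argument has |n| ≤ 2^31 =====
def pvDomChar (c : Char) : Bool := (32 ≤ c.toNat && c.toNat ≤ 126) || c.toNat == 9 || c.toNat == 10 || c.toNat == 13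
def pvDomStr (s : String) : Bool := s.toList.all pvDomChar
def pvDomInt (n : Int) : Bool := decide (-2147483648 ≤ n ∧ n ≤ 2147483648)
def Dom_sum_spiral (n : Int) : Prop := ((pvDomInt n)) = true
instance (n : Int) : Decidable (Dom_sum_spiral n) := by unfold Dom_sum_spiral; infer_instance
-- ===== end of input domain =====

-- B replaces A's double loop with an O(1) closed form (same return value everywhere).

-- ===== PORT A =====
def sum_spiral (n : Int) : Int :=
  let st := (PySem.List.pyRange 0 (4 * n - 3) 1).foldl
    (fun (st : Int × Int) k =>
      if PySem.Int.mod k 2 = 0 then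
        (PySem.List.pyRange k (k + n) 1).foldl
          (fun (st : Int × Int) _ => (st.1 + st.2, st.2 + 1)) st
      else
        (PySem.List.pyRange k (k + n) 1).foldl
          (fun (st : Int × Int) _ => (st.1 - st.2, st.2 + 1)) st)
    (0, 1)
  st.1

-- ===== PORT B =====
def sum_spiral_alt (n : Int) : Int :=
  if n < 1 then 0 else 2 * n * n * (n - 1) + PySem.Int.floordiv (n * (n + 1)) 2

-- ===== PRECONDITION & SPEC =====
def Spec_sum_spiral (n : Int) (out : Int) : Prop := out = sum_spiral_alt n
instance (n : Int) (out : Int) : Decidable (Spec_sum_spiral n out) := by unfold Spec_sum_spiral; infer_instance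

-- ===== CLAIM (what is proved, stated in full; the proofs are below) =====
def Claim_equal_sum_spiral : Prop := ∀ (n : Int), Dom_sum_spiral n → Spec_sum_spiral n (sum_spiral n)

-- ===== LEMMAS AND PROOFS =====

-- triangle numbers: tri m = m*(m-1)/2
def tri : Nat → Int
  | 0 => 0
  | m + 1 => tri m + m

theorem tri_two_mul (m : Nat) : 2 * tri m = (m : Int) * ((m : Int) - 1) := by
  induction m with
  | zero => simp [tri]
  | succ m ih => simp only [tri]; push_cast; linarith

theorem addBlock_eq (l : List Int) (r v : Int) :
    l.foldl (fun (st : Int × Int) _ => (st.1 + st.2, st.2 + 1)) (r, v)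
      = (r + (l.length : Int) * v + tri l.length, v + (l.length : Int)) := by
  induction l generalizing r v with
  | nil => simp [tri]
  | cons h t ih =>
      simp only [List.foldl_cons, ih, List.length_cons, tri]
      simp only [Prod.mk.injEq]
      refine ⟨?_, ?_⟩ <;> (push_cast; ring)

theorem subBlock_eq (l : List Int) (r v : Int) :
    l.foldl (fun (st : Int × Int) _ => (st.1 - st.2, st.2 + 1)) (r, v)
      = (r - (l.length : Int) * v - tri l.length, v + (l.length : Int)) := by
  induction l generalizing r v with
  | nil => simp [tri]
  | cons h t ih =>
      simp only [List.foldl_cons, ih, List.length_cons, tri]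
      simp only [Prod.mk.injEq]
      refine ⟨?_, ?_⟩ <;> (push_cast; ring)

-- the outer loop body
def outerF (n : Int) (st : Int × Int) (k : Int) : Int × Int :=
  if PySem.Int.mod k 2 = 0 then
    (PySem.List.pyRange k (k + n) 1).foldl
      (fun (st : Int × Int) _ => (st.1 + st.2, st.2 + 1)) st
  else
    (PySem.List.pyRange k (k + n) 1).foldl
      (fun (st : Int × Int) _ => (st.1 - st.2, st.2 + 1)) st

theorem mod_two_of_even (k : Int) (h : k % 2 = 0) : PySem.Int.mod k 2 = 0 := by
  rw [PySem.Int.mod_eq_emod_of_pos (by norm_num : (0:Int) < 2)]; exact h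

theorem mod_two_of_odd (k : Int) (h : k % 2 = 1) : PySem.Int.mod k 2 = 1 := by
  rw [PySem.Int.mod_eq_emod_of_pos (by norm_num : (0:Int) < 2)]; exact h

-- one even block followed by one odd block: the triangle parts cancel
theorem pair_step (n k r v : Int) (hn : 1 ≤ n) (hk : k % 2 = 0) :
    outerF n (outerF n (r, v) k) (k + 1) = (r - n * n, v + 2 * n) := by
  have hlen : ∀ a : Int, ((PySem.List.pyRange a (a + n) 1).length : Int) = n := by
    intro a
    rw [PySem.List.length_pyRange_one]
    omega
  have h1 : outerF n (r, v) k
      = (r + n * v + tri (PySem.List.pyRange k (k + n) 1).length, v + n) := by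
    unfold outerF
    rw [if_pos (mod_two_of_even k hk), addBlock_eq, hlen]
  have h2 : PySem.Int.mod (k + 1) 2 = 1 := mod_two_of_odd _ (by omega)
  rw [h1]
  unfold outerF
  rw [if_neg (by rw [h2]; norm_num), subBlock_eq]
  have e1 : ((PySem.List.pyRange k (k + n) 1).length : Int) = n := hlen k
  have e2 : ((PySem.List.pyRange (k + 1) (k + 1 + n) 1).length : Int) = n := hlen (k + 1)
  have e3 : (PySem.List.pyRange (k + 1) (k + 1 + n) 1).length
      = (PySem.List.pyRange k (k + n) 1).length := by omega
  rw [e3]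
  simp only [Prod.mk.injEq]
  refine ⟨?_, ?_⟩ <;> (rw [e1]; ring)

-- j consecutive pairs of blocks starting at an even k
theorem pairs_eq (n : Int) (hn : 1 ≤ n) (j : Nat) (k r v : Int) (hk : k % 2 = 0) :
    (PySem.List.pyRange k (k + 2 * j) 1).foldl (outerF n) (r, v)
      = (r - (j : Int) * (n * n), v + 2 * (j : Int) * n) := by
  induction j generalizing k r v with
  | zero => rw [show k + 2 * (0 : Nat) = k by push_cast; ring,
      PySem.List.pyRange_one_eq_nil le_rfl]; simp
  | succ j ih =>
      rw [PySem.List.pyRange_one_cons (by push_cast; omega)]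
      rw [PySem.List.pyRange_one_cons (by push_cast; omega)]
      simp only [List.foldl_cons]
      rw [pair_step n k r v hn hk]
      rw [show k + 1 + 1 = k + 2 by ring,
          show k + 2 * (((j:Nat) + 1 : Nat) : Int) = (k + 2) + 2 * (j : Nat) by push_cast; ring]
      rw [ih (k + 2) _ _ (by omega)]
      simp only [Prod.mk.injEq]
      refine ⟨?_, ?_⟩ <;> (push_cast; ring)

-- main computation for n ≥ 1
theorem sum_spiral_pos (n : Int) (hn : 1 ≤ n) :
    sum_spiral n = 2 * n * n * (n - 1) + tri n.toNat + n := by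
  unfold sum_spiral
  have hsplit : PySem.List.pyRange 0 (4 * n - 3) 1
      = PySem.List.pyRange 0 (4 * n - 4) 1 ++ [4 * n - 4] := by
    rw [show 4 * n - 3 = (4 * n - 4) + 1 by ring]
    exact PySem.List.pyRange_one_succ_right (by omega)
  simp only [hsplit, List.foldl_append, List.foldl_cons, List.foldl_nil]
  have hje : (0 : Int) + 2 * ((2 * n - 2).toNat : Int) = 4 * n - 4 := by omega
  have hpairs := pairs_eq n hn (2 * n - 2).toNat 0 0 1 (by omega)
  rw [show (0 : Int) + 2 * (((2 * n - 2).toNat : Nat) : Int) = 4 * n - 4 from hje] at hpairs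
  show (outerF n ((PySem.List.pyRange 0 (4 * n - 4) 1).foldl (outerF n) (0, 1)) (4 * n - 4)).1 = _
  rw [hpairs]
  unfold outerF
  rw [if_pos (mod_two_of_even _ (by omega))]
  rw [addBlock_eq]
  have hlen : ((PySem.List.pyRange (4 * n - 4) (4 * n - 4 + n) 1).length : Int) = n := by
    rw [PySem.List.length_pyRange_one]; omega
  have hlen' : ((PySem.List.pyRange (4 * n - 4) (4 * n - 4 + n) 1).length : Nat) = n.toNat := by
    omega
  simp only [hlen']
  have hj : (((2 * n - 2).toNat : Nat) : Int) = 2 * n - 2 := by omega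
  have hnn : ((n.toNat : Nat) : Int) = n := by omega
  rw [hj, hnn]
  ring

theorem floordiv_tri (n : Int) (hn : 1 ≤ n) :
    PySem.Int.floordiv (n * (n + 1)) 2 = tri n.toNat + n := by
  rw [PySem.Int.floordiv_eq_iff_of_pos (by norm_num : (0:Int) < 2)]
  have h2 : 2 * tri n.toNat = (n.toNat : Int) * ((n.toNat : Int) - 1) := tri_two_mul n.toNat
  have hnn : ((n.toNat : Nat) : Int) = n := by omega
  rw [hnn] at h2
  constructor <;> nlinarith

-- ===== VERDICT (by name: the statement is the Claim_ definition above) =====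
theorem sum_spiral_spec : Claim_equal_sum_spiral := by
  intro n _
  unfold Spec_sum_spiral sum_spiral_alt
  by_cases hn : n < 1
  · rw [if_pos hn]
    unfold sum_spiral
    rw [PySem.List.pyRange_one_eq_nil (by omega)]
    simp
  · rw [if_neg hn]
    rw [sum_spiral_pos n (by omega), floordiv_tri n (by omega)]
    ring
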